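-- pv_equiv track=rewrite | github.com/enricotomasi/GeeksforGeeks_problems | Easy/Sum of length.py | sumoflength
-- ===== SOURCE A (Python) =====
-- def sumoflength(arr, n):
--     c = 0
--     temp = set()
--     ans = 0
--
--     for i in range(n):
--         while c < n and arr[c] not in temp:
--             temp.add(arr[c])
--             c += 1
--         ans += (c - i) * (c - i + 1) // 2
--         temp.remove(arr[i])
--
--     return ans
-- ===== SOURCE B (Python) =====
-- def sumoflength(arr, n):
--     ans = 0
--     start = 0
--     last = {}
--     for j in range(n):
--         v = arr[j]
--         if v in last and last[v] >= start:
--             start = last[v] + 1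
--         last[v] = j
--         ans += (j - start + 1) * (j - start + 2) // 2
--     return ans
-- ===== Notes on version B (the rewrite author's own statement) =====
-- stated objective: alternative
-- what changed: A's grow/shrink sliding window (inner while loop extending a set, one element removed per left endpoint) is replaced by a single forward pass over right endpoints that keeps a last-occurrence dictionary and jumps the window start directly, with no inner loop and no set; both sum k*(k+1)//2 over maximal distinct windows, accounted by left vs by right endpoint.
import Mathlib
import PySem

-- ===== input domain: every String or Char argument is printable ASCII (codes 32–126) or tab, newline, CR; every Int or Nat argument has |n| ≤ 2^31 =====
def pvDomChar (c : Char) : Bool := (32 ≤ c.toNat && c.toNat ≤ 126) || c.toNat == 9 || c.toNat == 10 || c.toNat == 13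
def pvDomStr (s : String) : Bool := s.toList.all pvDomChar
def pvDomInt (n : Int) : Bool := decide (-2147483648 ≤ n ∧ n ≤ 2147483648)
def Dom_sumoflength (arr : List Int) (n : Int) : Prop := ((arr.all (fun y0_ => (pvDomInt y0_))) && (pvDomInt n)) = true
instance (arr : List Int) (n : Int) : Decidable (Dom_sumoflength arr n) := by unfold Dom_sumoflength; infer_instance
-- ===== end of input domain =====

-- B replaces A's grow/shrink set window (inner while loop + set removal per left endpoint) by a single
-- forward pass over right endpoints with a last-occurrence dictionary driving the window start (objective: alternative).

-- ===== PORT A =====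
-- the inner 'while c < n and arr[c] not in temp: temp.add(arr[c]); c += 1'
def sumoflengthWhile (arr : List Int) (n : Int) (c : Int) (temp : PySem.Set Int) :
    Int × PySem.Set Int :=
  if h : c < n ∧ PySem.Set.contains temp (PySem.List.pyGetD arr c 0) = false then
    sumoflengthWhile arr n (c + 1) (PySem.Set.add temp (PySem.List.pyGetD arr c 0))
  else (c, temp)
termination_by (n - c).toNat
decreasing_by omega

-- one iteration of A's 'for i in range(n)' body, state = (c, temp, ans)
def sumoflengthStep (arr : List Int) (n : Int) (st : Int × PySem.Set Int × Int) (i : Int) :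
    Int × PySem.Set Int × Int :=
  match st with
  | (c, temp, ans) =>
    let p := sumoflengthWhile arr n c temp
    let ans' := ans + PySem.Int.floordiv ((p.1 - i) * (p.1 - i + 1)) 2
    -- temp.remove(arr[i]); KeyError is impossible on Pre_ (arr[i] is in the window)
    let temp' := (PySem.Set.remove? p.2 (PySem.List.pyGetD arr i 0)).getD p.2
    (p.1, temp', ans')

def sumoflength (arr : List Int) (n : Int) : Int :=
  ((PySem.List.pyRange 0 n 1).foldl (sumoflengthStep arr n)
    (0, (PySem.Set.empty : PySem.Set Int), 0)).2.2

-- ===== PORT B =====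
-- one iteration of B's 'for j in range(n)' body, state = (ans, start, last)
def sumoflengthAltStep (arr : List Int) (st : Int × Int × PySem.Dict Int Int) (j : Int) :
    Int × Int × PySem.Dict Int Int :=
  match st with
  | (ans, start, last) =>
    let v := PySem.List.pyGetD arr j 0
    let start' :=
      match last.get? v with
      | some k => if start ≤ k then k + 1 else start
      | none => start
    let last' := last.insert v j
    (ans + PySem.Int.floordiv ((j - start' + 1) * (j - start' + 2)) 2, start', last')

def sumoflength_alt (arr : List Int) (n : Int) : Int :=
  ((PySem.List.pyRange 0 n 1).foldl (sumoflengthAltStep arr)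
    (0, 0, (PySem.Dict.empty : PySem.Dict Int Int))).1

-- ===== PRECONDITION & SPEC =====
-- Pre_ excludes exactly the inputs n > len(arr), on which Python A (and Python B) raise IndexError.
def Pre_sumoflength (arr : List Int) (n : Int) : Prop := n ≤ (arr.length : Int)
instance (arr : List Int) (n : Int) : Decidable (Pre_sumoflength arr n) := by
  unfold Pre_sumoflength; infer_instance

def pvWitness_sumoflength : List Int × Int := ([1, 2, 1, 3], 4)

def Spec_sumoflength (arr : List Int) (n : Int) (out : Int) : Prop := out = sumoflength_alt arr n
instance (arr : List Int) (n : Int) (out : Int) : Decidable (Spec_sumoflength arr n out) := by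
  unfold Spec_sumoflength; infer_instance

-- ===== CLAIM (what is proved, stated in full; the proofs are below) =====
def Claim_equal_sumoflength : Prop := ∀ (arr : List Int) (n : Int), Dom_sumoflength arr n →
  Pre_sumoflength arr n → Spec_sumoflength arr n (sumoflength arr n)

-- ===== LEMMAS AND PROOFS =====

-- value at index k (both loops only read indexes 0 ≤ k < n)
def pvF (arr : List Int) (k : Int) : Int := PySem.List.pyGetD arr k 0

-- "the half-open window [i, j) holds pairwise-distinct values"
def pvNod (arr : List Int) (i j : Int) : Prop :=
  ∀ k l : Int, i ≤ k → k < l → l < j → pvF arr k ≠ pvF arr l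

theorem pvNod_mono {arr : List Int} {i j i' j' : Int} (hi : i ≤ i') (hj : j' ≤ j)
    (h : pvNod arr i j) : pvNod arr i' j' :=
  fun k l hk hkl hl => h k l (by omega) hkl (by omega)

-- the summand: length of subarray [i..j] if it is distinct, else 0
noncomputable def pvG (arr : List Int) (i j : Int) : Int :=
  @ite _ (i ≤ j ∧ pvNod arr i (j + 1)) (Classical.propDecidable _) (j - i + 1) 0

noncomputable def pvRow (arr : List Int) (n i : Int) : Int := ∑ j ∈ Finset.Ico (0 : ℤ) n, pvG arr i j
noncomputable def pvCol (arr : List Int) (n j : Int) : Int := ∑ i ∈ Finset.Ico (0 : ℤ) n, pvG arr i j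

theorem sum_Ico_insert_bot {a b : ℤ} (h : a < b) (F : ℤ → ℤ) :
    ∑ x ∈ Finset.Ico a b, F x = F a + ∑ x ∈ Finset.Ico (a + 1) b, F x := by
  have hs : Finset.Ico a b = insert a (Finset.Ico (a + 1) b) := by
    ext x; simp only [Finset.mem_Ico, Finset.mem_insert]; omega
  rw [hs, Finset.sum_insert (by simp only [Finset.mem_Ico]; omega)]

theorem twice_sum_up (a : ℤ) : ∀ (b : ℤ), a ≤ b →
    2 * (∑ j ∈ Finset.Ico a b, (j - a + 1)) = (b - a) * (b - a + 1) := by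
  intro b hb
  induction b, hb using Int.le_induction with
  | base => simp
  | succ n hmn ih =>
    have hs : Finset.Ico a (n + 1) = insert n (Finset.Ico a n) := by
      ext x; simp only [Finset.mem_Ico, Finset.mem_insert]; omega
    rw [hs, Finset.sum_insert (by simp only [Finset.mem_Ico]; omega), mul_add, ih]
    ring

theorem twice_sum_down (a : ℤ) : ∀ (b : ℤ), a ≤ b →
    2 * (∑ i ∈ Finset.Ico a b, (b - i)) = (b - a) * (b - a + 1) := by
  intro b hb
  have : ∑ i ∈ Finset.Ico a b, (b - i) = ∑ j ∈ Finset.Ico a b, (j - a + 1) := by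
    apply Finset.sum_nbij' (fun j => a + b - 1 - j) (fun j => a + b - 1 - j) <;>
      intros <;> simp_all only [Finset.mem_Ico] <;> omega
  rw [this]; exact twice_sum_up a b hb

theorem sum_ite_window {p q n : ℤ} (h0 : 0 ≤ p) (hq : q ≤ n) (F : ℤ → ℤ) :
    ∑ j ∈ Finset.Ico (0 : ℤ) n, (if p ≤ j ∧ j < q then F j else 0) = ∑ j ∈ Finset.Ico p q, F j := by
  rw [← Finset.sum_filter]
  congr 1
  ext x; simp only [Finset.mem_filter, Finset.mem_Ico]; omega

-- a row of the double sum, evaluated from the maximal window [i, c)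
theorem row_eval {arr : List Int} {n i c : Int} (h0 : 0 ≤ i) (hic : i ≤ c) (hcn : c ≤ n)
    (hnod : pvNod arr i c)
    (hstop : c = n ∨ ∃ t, i ≤ t ∧ t < c ∧ pvF arr t = pvF arr c) :
    pvRow arr n i = (c - i) * (c - i + 1) / 2 := by
  unfold pvRow
  have hpt : ∀ j ∈ Finset.Ico (0 : ℤ) n, pvG arr i j = if i ≤ j ∧ j < c then (j - i + 1) else 0 := by
    intro j hj
    simp only [Finset.mem_Ico] at hj
    unfold pvG
    by_cases h1 : i ≤ j ∧ j < c
    · rw [if_pos h1, if_pos ⟨h1.1, pvNod_mono le_rfl (by omega) hnod⟩]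
    · rw [if_neg h1]
      by_cases h2 : i ≤ j
      · rw [if_neg]
        rintro ⟨-, hnod'⟩
        rcases hstop with rfl | ⟨t, ht1, ht2, ht3⟩
        · omega
        · exact hnod' t c ht1 ht2 (by omega) ht3
      · rw [if_neg (by tauto)]
  rw [Finset.sum_congr rfl hpt, sum_ite_window h0 hcn]
  have h2 := twice_sum_up i c hic
  rw [← h2, Int.mul_ediv_cancel_left _ (by norm_num : (2:ℤ) ≠ 0)]

-- a column of the double sum, evaluated from the maximal window [s, j]
theorem col_eval {arr : List Int} {n j s : Int} (h0 : 0 ≤ s) (hsj : s ≤ j) (hjn : j < n)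
    (hnod : pvNod arr s (j + 1))
    (hmax : ∀ i', 0 ≤ i' → i' < s → ¬ pvNod arr i' (j + 1)) :
    pvCol arr n j = (j - s + 1) * (j - s + 2) / 2 := by
  unfold pvCol
  have hpt : ∀ i' ∈ Finset.Ico (0 : ℤ) n, pvG arr i' j = if s ≤ i' ∧ i' < j + 1 then (j - i' + 1) else 0 := by
    intro i' hi'
    simp only [Finset.mem_Ico] at hi'
    unfold pvG
    by_cases h1 : s ≤ i' ∧ i' < j + 1
    · rw [if_pos h1, if_pos ⟨by omega, pvNod_mono h1.1 le_rfl hnod⟩]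
    · rw [if_neg h1]
      by_cases h2 : i' ≤ j
      · rw [if_neg]
        rintro ⟨-, hnod'⟩
        exact hmax i' hi'.1 (by omega) hnod'
      · rw [if_neg (by tauto)]
  rw [Finset.sum_congr rfl hpt, sum_ite_window h0 (by omega : j + 1 ≤ n),
      Finset.sum_congr rfl (fun x _ => by ring : ∀ x ∈ Finset.Ico s (j + 1), (j - x + 1 : ℤ) = (j + 1) - x)]
  have h2 := twice_sum_down s (j + 1) (by omega)
  have h3 : (j + 1 - s) * (j + 1 - s + 1) = (j - s + 1) * (j - s + 2) := by ring
  rw [h3] at h2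
  rw [← h2, Int.mul_ediv_cancel_left _ (by norm_num : (2:ℤ) ≠ 0)]

-- specification of A's inner while loop
theorem whl_spec {arr : List Int} {n i : Int} :
    ∀ (fuel : ℕ) (c : Int) (temp : PySem.Set Int), (n - c).toNat ≤ fuel →
    i ≤ c → c ≤ n → pvNod arr i c →
    (∀ x, x ∈ temp ↔ ∃ t, i ≤ t ∧ t < c ∧ pvF arr t = x) →
    c ≤ (sumoflengthWhile arr n c temp).1 ∧
    (sumoflengthWhile arr n c temp).1 ≤ n ∧
    pvNod arr i (sumoflengthWhile arr n c temp).1 ∧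
    (∀ x, x ∈ (sumoflengthWhile arr n c temp).2 ↔
      ∃ t, i ≤ t ∧ t < (sumoflengthWhile arr n c temp).1 ∧ pvF arr t = x) ∧
    ((sumoflengthWhile arr n c temp).1 = n ∨
      ∃ t, i ≤ t ∧ t < (sumoflengthWhile arr n c temp).1 ∧
        pvF arr t = pvF arr (sumoflengthWhile arr n c temp).1) ∧
    (c < n → pvF arr c ∉ temp → c < (sumoflengthWhile arr n c temp).1) := by
  intro fuel
  induction fuel with
  | zero =>
    intro c temp hfuel hic hcn hnod hmem
    have hcond : ¬ (c < n ∧ PySem.Set.contains temp (PySem.List.pyGetD arr c 0) = false) := by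
      rintro ⟨h1, -⟩; omega
    rw [sumoflengthWhile, dif_neg hcond]
    exact ⟨le_rfl, hcn, hnod, hmem, Or.inl (by omega), fun h1 _ => absurd h1 (by omega)⟩
  | succ f ih =>
    intro c temp hfuel hic hcn hnod hmem
    by_cases hcond : c < n ∧ PySem.Set.contains temp (PySem.List.pyGetD arr c 0) = false
    · rw [sumoflengthWhile, dif_pos hcond]
      have hv : pvF arr c ∉ temp := by
        intro hm
        have h := (PySem.Set.contains_iff temp (PySem.List.pyGetD arr c 0)).2 hm
        rw [hcond.2] at h
        exact absurd h (by simp)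
      have hadd : PySem.Set.add temp (PySem.List.pyGetD arr c 0) = temp ++ [pvF arr c] :=
        PySem.Set.add_of_not_mem hv
      have hnod' : pvNod arr i (c + 1) := by
        intro k l hk hkl hl
        by_cases hlc : l < c
        · exact hnod k l hk hkl hlc
        · have hl' : l = c := by omega
          intro heq
          exact hv ((hmem (pvF arr c)).2 ⟨k, hk, by omega, heq.trans (congrArg (pvF arr) hl')⟩)
      have hmem' : ∀ x, x ∈ temp ++ [pvF arr c] ↔ ∃ t, i ≤ t ∧ t < c + 1 ∧ pvF arr t = x := by
        intro x
        simp only [List.mem_append, List.mem_singleton]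
        constructor
        · rintro (hx | rfl)
          · obtain ⟨t, h1, h2, h3⟩ := (hmem x).1 hx
            exact ⟨t, h1, by omega, h3⟩
          · exact ⟨c, by omega, by omega, rfl⟩
        · rintro ⟨t, h1, h2, h3⟩
          by_cases htc : t < c
          · exact Or.inl ((hmem x).2 ⟨t, h1, htc, h3⟩)
          · have ht : t = c := by omega
            subst ht
            exact Or.inr h3.symm
      rw [hadd]
      obtain ⟨g1, g2, g3, g4, g5, g6⟩ :=
        ih (c + 1) (temp ++ [pvF arr c]) (by omega) (by omega) (by omega) hnod' hmem'
      exact ⟨by omega, g2, g3, g4, g5, fun _ _ => by omega⟩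
    · rw [sumoflengthWhile, dif_neg hcond]
      refine ⟨le_rfl, hcn, hnod, hmem, ?_, ?_⟩
      · by_cases hc : c = n
        · exact Or.inl hc
        · have hcn' : c < n := by omega
          have hct : PySem.Set.contains temp (PySem.List.pyGetD arr c 0) = true := by
            cases h : PySem.Set.contains temp (PySem.List.pyGetD arr c 0)
            · exact absurd ⟨hcn', h⟩ hcond
            · rfl
          have hm : pvF arr c ∈ temp := (PySem.Set.contains_iff temp (pvF arr c)).1 hct
          obtain ⟨t, h1, h2, h3⟩ := (hmem (pvF arr c)).1 hm
          exact Or.inr ⟨t, h1, h2, h3⟩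
      · intro h1 h2
        exfalso
        have hcf : PySem.Set.contains temp (PySem.List.pyGetD arr c 0) = false := by
          cases h : PySem.Set.contains temp (PySem.List.pyGetD arr c 0)
          · rfl
          · exact absurd ((PySem.Set.contains_iff temp (pvF arr c)).1 h) h2
        exact hcond ⟨h1, hcf⟩

-- A's outer loop computes the row sums
theorem foldA {arr : List Int} {n : Int} :
    ∀ (fuel : ℕ) (i c : Int) (temp : PySem.Set Int) (ans : Int), (n - i).toNat ≤ fuel →
    0 ≤ i → i ≤ c → c ≤ n → pvNod arr i c →
    (∀ x, x ∈ temp ↔ ∃ t, i ≤ t ∧ t < c ∧ pvF arr t = x) →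
    ((PySem.List.pyRange i n 1).foldl (sumoflengthStep arr n) (c, temp, ans)).2.2
      = ans + ∑ i' ∈ Finset.Ico i n, pvRow arr n i' := by
  intro fuel
  induction fuel with
  | zero =>
    intro i c temp ans hfuel h0 hic hcn hnod hmem
    rw [PySem.List.pyRange_one_eq_nil (by omega : n ≤ i)]
    simp [Finset.Ico_eq_empty (by omega : ¬ i < n)]
  | succ f ih =>
    intro i c temp ans hfuel h0 hic hcn hnod hmem
    by_cases hin : n ≤ i
    · rw [PySem.List.pyRange_one_eq_nil hin]
      simp [Finset.Ico_eq_empty (by omega : ¬ i < n)]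
    · have hin' : i < n := by omega
      rw [PySem.List.pyRange_one_cons hin', List.foldl_cons]
      obtain ⟨g1, g2, g3, g4, g5, g6⟩ :=
        whl_spec (arr := arr) (n := n) (i := i) (n - c).toNat c temp le_rfl hic hcn hnod hmem
      set p := sumoflengthWhile arr n c temp with hp
      have hic' : i < p.1 := by
        by_cases hci : c = i
        · subst hci
          exact g6 (by omega) (fun hm => by obtain ⟨t, h1, h2, -⟩ := (hmem _).1 hm; omega)
        · omega
      have hstep : sumoflengthStep arr n (c, temp, ans) i =
          (p.1, (PySem.Set.remove? p.2 (PySem.List.pyGetD arr i 0)).getD p.2,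
           ans + PySem.Int.floordiv ((p.1 - i) * (p.1 - i + 1)) 2) := rfl
      rw [hstep]
      have hvm : pvF arr i ∈ p.2 := (g4 (pvF arr i)).2 ⟨i, le_rfl, hic', rfl⟩
      have hrem : (PySem.Set.remove? p.2 (PySem.List.pyGetD arr i 0)).getD p.2 =
          PySem.Set.discard p.2 (pvF arr i) := by
        rw [show PySem.List.pyGetD arr i 0 = pvF arr i from rfl, PySem.Set.remove?_of_mem hvm]
        rfl
      rw [hrem]
      have hnod' : pvNod arr (i + 1) p.1 := pvNod_mono (by omega) le_rfl g3
      have hmem' : ∀ x, x ∈ PySem.Set.discard p.2 (pvF arr i) ↔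
          ∃ t, i + 1 ≤ t ∧ t < p.1 ∧ pvF arr t = x := by
        intro x
        rw [PySem.Set.mem_discard]
        constructor
        · rintro ⟨hx, hne⟩
          obtain ⟨t, h1, h2, h3⟩ := (g4 x).1 hx
          refine ⟨t, ?_, h2, h3⟩
          by_cases ht : t = i
          · subst ht
            exact absurd h3.symm hne
          · omega
        · rintro ⟨t, h1, h2, h3⟩
          refine ⟨(g4 x).2 ⟨t, by omega, h2, h3⟩, ?_⟩
          intro hxe
          exact g3 i t le_rfl (lt_of_lt_of_le (lt_add_one i) h1) h2 (h3.trans hxe).symm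
      have hf' : (n - (i + 1)).toNat ≤ f := by clear g5; omega
      have h0' : (0:ℤ) ≤ i + 1 := by clear g5; omega
      have hic1 : i + 1 ≤ p.1 := by clear g5; omega
      have hip : i ≤ p.1 := by clear g5; omega
      rw [ih (i + 1) p.1 (PySem.Set.discard p.2 (pvF arr i))
            (ans + PySem.Int.floordiv ((p.1 - i) * (p.1 - i + 1)) 2) hf' h0' hic1
            g2 hnod' hmem',
          sum_Ico_insert_bot hin' (pvRow arr n),
          PySem.Int.floordiv_eq_ediv_of_pos (by norm_num : (0:ℤ) < 2),
          ← row_eval h0 hip g2 g3 g5]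
      ring

-- B's loop computes the column sums
theorem foldB {arr : List Int} {n : Int} :
    ∀ (fuel : ℕ) (j start : Int) (last : PySem.Dict Int Int) (ans : Int), (n - j).toNat ≤ fuel →
    0 ≤ start → start ≤ j → pvNod arr start j →
    (∀ i', 0 ≤ i' → i' < start → ¬ pvNod arr i' j) →
    (∀ v k, last.get? v = some k →
      0 ≤ k ∧ k < j ∧ pvF arr k = v ∧ ∀ l, k < l → l < j → pvF arr l ≠ v) →
    (∀ k, 0 ≤ k → k < j → last.contains (pvF arr k) = true) →
    ((PySem.List.pyRange j n 1).foldl (sumoflengthAltStep arr) (ans, start, last)).1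
      = ans + ∑ j' ∈ Finset.Ico j n, pvCol arr n j' := by
  intro fuel
  induction fuel with
  | zero =>
    intro j start last ans hfuel hs0 hsj hnod hmax hd1 hd2
    rw [PySem.List.pyRange_one_eq_nil (by omega : n ≤ j)]
    simp [Finset.Ico_eq_empty (by omega : ¬ j < n)]
  | succ f ih =>
    intro j start last ans hfuel hs0 hsj hnod hmax hd1 hd2
    by_cases hjn : n ≤ j
    · rw [PySem.List.pyRange_one_eq_nil hjn]
      simp [Finset.Ico_eq_empty (by omega : ¬ j < n)]
    · have hjn' : j < n := by omega
      have hfB : (n - (j + 1)).toNat ≤ f := by omega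
      rw [PySem.List.pyRange_one_cons hjn', List.foldl_cons]
      have hd1' : ∀ v' k', (last.insert (PySem.List.pyGetD arr j 0) j).get? v' = some k' →
          0 ≤ k' ∧ k' < j + 1 ∧ pvF arr k' = v' ∧ ∀ l, k' < l → l < j + 1 → pvF arr l ≠ v' := by
        intro v' k' h
        rw [PySem.Dict.get?_insert] at h
        split_ifs at h with hv'
        · have hk' : k' = j := by injection h with h2; omega
          subst hk'
          refine ⟨by omega, by omega, by rw [hv']; rfl, ?_⟩
          intro l hl1 hl2
          exact absurd hl2 (by omega)
        · obtain ⟨e1, e2, e3, e4⟩ := hd1 v' k' h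
          refine ⟨e1, by omega, e3, ?_⟩
          intro l hl1 hl2
          by_cases hlj : l = j
          · subst hlj
            intro he
            exact hv' he.symm
          · exact e4 l hl1 (by omega)
      have hd2' : ∀ k', 0 ≤ k' → k' < j + 1 →
          (last.insert (PySem.List.pyGetD arr j 0) j).contains (pvF arr k') = true := by
        intro k' h1 h2
        by_cases hk : k' = j
        · subst hk
          exact PySem.Dict.contains_insert_self last _ _
        · rw [PySem.Dict.contains_insert, hd2 k' h1 (by omega)]
          simp
      rcases hg : last.get? (PySem.List.pyGetD arr j 0) with _ | k
      · have hnod' : pvNod arr start (j + 1) := by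
          intro k l hk hkl hl
          by_cases hlj : l < j
          · exact hnod k l hk hkl hlj
          · have hl' : l = j := by omega
            intro heq
            have hc := hd2 k (by omega) (by omega)
            have hcf : last.contains (PySem.List.pyGetD arr j 0) = false :=
              (PySem.Dict.get?_eq_none_iff_contains last _).1 hg
            rw [show pvF arr k = PySem.List.pyGetD arr j 0
                  from heq.trans (congrArg (pvF arr) hl'), hcf] at hc
            exact absurd hc (by simp)
        have hmax' : ∀ i', 0 ≤ i' → i' < start → ¬ pvNod arr i' (j + 1) :=
          fun i' h1 h2 hn => hmax i' h1 h2 (pvNod_mono le_rfl (by omega) hn)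
        have hstep : sumoflengthAltStep arr (ans, start, last) j =
            (ans + PySem.Int.floordiv ((j - start + 1) * (j - start + 2)) 2, start,
             last.insert (PySem.List.pyGetD arr j 0) j) := by
          simp only [sumoflengthAltStep, hg]
        rw [hstep,
            ih (j + 1) start (last.insert (PySem.List.pyGetD arr j 0) j) _ hfB hs0
              (by omega) hnod' hmax' hd1' hd2',
            sum_Ico_insert_bot hjn' (pvCol arr n),
            PySem.Int.floordiv_eq_ediv_of_pos (by norm_num : (0:ℤ) < 2),
            ← col_eval hs0 hsj hjn' hnod' hmax']
        ring
      · obtain ⟨e1, e2, e3, e4⟩ := hd1 _ k hg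
        by_cases hsk : start ≤ k
        · have hnod' : pvNod arr (k + 1) (j + 1) := by
            intro k' l hk' hk'l hl
            by_cases hlj : l < j
            · exact hnod k' l (by omega) hk'l hlj
            · have hl' : l = j := by omega
              intro heq
              exact e4 k' (by omega) (by omega) (heq.trans (congrArg (pvF arr) hl'))
          have hmax' : ∀ i', 0 ≤ i' → i' < k + 1 → ¬ pvNod arr i' (j + 1) := by
            intro i' h1 h2 hn
            exact hn k j (by omega) (by omega) (by omega) e3
          have hstep : sumoflengthAltStep arr (ans, start, last) j =
              (ans + PySem.Int.floordiv ((j - (k + 1) + 1) * (j - (k + 1) + 2)) 2, k + 1,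
               last.insert (PySem.List.pyGetD arr j 0) j) := by
            simp only [sumoflengthAltStep, hg, if_pos hsk]
          rw [hstep,
              ih (j + 1) (k + 1) (last.insert (PySem.List.pyGetD arr j 0) j) _ hfB (by omega)
                (by omega) hnod' hmax' hd1' hd2',
              sum_Ico_insert_bot hjn' (pvCol arr n),
              PySem.Int.floordiv_eq_ediv_of_pos (by norm_num : (0:ℤ) < 2),
              ← col_eval (by omega : (0:ℤ) ≤ k + 1) (by omega : k + 1 ≤ j) hjn' hnod' hmax']
          ring
        · have hnod' : pvNod arr start (j + 1) := by
            intro k' l hk' hk'l hl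
            by_cases hlj : l < j
            · exact hnod k' l hk' hk'l hlj
            · have hl' : l = j := by omega
              intro heq
              exact e4 k' (by omega) (by omega) (heq.trans (congrArg (pvF arr) hl'))
          have hmax' : ∀ i', 0 ≤ i' → i' < start → ¬ pvNod arr i' (j + 1) :=
            fun i' h1 h2 hn => hmax i' h1 h2 (pvNod_mono le_rfl (by omega) hn)
          have hstep : sumoflengthAltStep arr (ans, start, last) j =
              (ans + PySem.Int.floordiv ((j - start + 1) * (j - start + 2)) 2, start,
               last.insert (PySem.List.pyGetD arr j 0) j) := by
            simp only [sumoflengthAltStep, hg, if_neg hsk]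
          rw [hstep,
              ih (j + 1) start (last.insert (PySem.List.pyGetD arr j 0) j) _ hfB hs0
                (by omega) hnod' hmax' hd1' hd2',
              sum_Ico_insert_bot hjn' (pvCol arr n),
              PySem.Int.floordiv_eq_ediv_of_pos (by norm_num : (0:ℤ) < 2),
              ← col_eval hs0 hsj hjn' hnod' hmax']
          ring

-- ===== VERDICT (by name: the statement is the Claim_ definition above) =====
theorem sumoflength_spec : Claim_equal_sumoflength := by
  intro arr n _ _
  unfold Spec_sumoflength sumoflength sumoflength_alt
  by_cases hn : n ≤ 0
  · rw [PySem.List.pyRange_one_eq_nil hn]; rfl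
  · have hn : (0:ℤ) < n := by omega
    rw [foldA n.toNat 0 0 PySem.Set.empty 0 (by omega) le_rfl le_rfl (by omega)
          (fun k l hk hkl hl => absurd (by omega : (0:ℤ) < 0) (by omega))
          (by intro x; simp only [PySem.Set.empty, List.not_mem_nil]; constructor
              · intro h; exact absurd h (by simp)
              · rintro ⟨t, ht1, ht2, _⟩; omega),
        foldB n.toNat 0 0 PySem.Dict.empty 0 (by omega) le_rfl le_rfl
          (fun k l hk hkl hl => absurd (by omega : (0:ℤ) < 0) (by omega))
          (fun i' h1 h2 => absurd (by omega : (0:ℤ) < 0) (by omega))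
          (by intro v k h; rw [PySem.Dict.get?_empty] at h; exact absurd h (by simp))
          (fun k h1 h2 => absurd (by omega : (0:ℤ) < 0) (by omega))]
    simp only [zero_add]
    unfold pvRow pvCol
    exact Finset.sum_comm
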